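-- pv_equiv track=rewrite | github.com/jbischof/algo_practice | prep/prep2.py | find_valid_sequences
-- ===== SOURCE A (Python) =====
-- def find_valid_sequences(s):
--     """
--     Return subsequences of string s between 'BEGIN' and 'END' tokens.
--     All tokens are space separated.  Note that multiple BEGIN and END tokens may
--     occur in sequence, but this is not valid. We just want substrings between
--     BEGIN and END.
--
--     Note: This question was part of my horrible Stripe screen.
--
--     Example:
--     s = "BEGIN BEGIN 1 0 BEGIN 4 3 9 END END 5 4 BEGIN 4 2 1 END 3 END"
--     return ["4 3 9", "4 2 1"]
--
--     Idea: Split the string into a list of tokens. Keep track of the most recent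
--     special token seen. If BEGIN is at the top of the stack keep recording, but
--     if see BEGIN again before END throw it away. If see END next, save the
--     sequence to the return value.
--
--     Time: O(N)
--     Space: O(N)
--
--     s = "BEGIN BEGIN 1 0 BEGIN 4 3 9 END END 5 4 BEGIN 4 2 1 END 3 END"
--               0        1        2    3    4        5    6    7    8      9
--     tokens = ["BEGIN", "BEGIN", "1", "0", "BEGIN", "4", "3", "9", "END", "END",
--               10   11   12       13   14   15   16     17   18
--               "5", "4", "BEGIN", "4", "2", "1", "END", "3", "END"]
--     i,  token, ls, buffer, res
--     0,  begin, begin, [], []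
--     1,  begin, begin, [], []
--     2,  1,     begin, [1], []
--     3,  0,     begin, [1, 0], []
--     4,  begin, begin, [], []
--     5,  4,     begin, [4], []
--     6,  3,     begin, [4, 3], []
--     7,  9,     begin, [4, 3, 9], []
--     8,  end,   begin, [], ["4 3 9"]
--     9,  end,   end,   [], ["4 3 9"]
--     10, 5,     end,   [], ["4 3 9"]
--     11, 4,     end,   [], ["4 3 9"]
--     12, begin, end,   [], ["4 3 9"]
--     13, 4,     begin, [4], ["4 3 9"]
--     etc etc
--     """
--
--     begin = "BEGIN"
--     end = "END"
--     specials = [begin, end]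
--     res = []
--     buffer = []
--
--     tokens = s.split(" ")
--     last_special = begin
--     # No point starting before the first BEGIN
--     try:
--         start = tokens.index(begin)
--     except ValueError:
--         # No BEGIN token
--         return []
--
--     for token in tokens[start: ]:
--         if last_special == begin:
--             if token not in specials:
--                 buffer.append(token)
--             elif token == end and len(buffer) > 0:
--                 res.append(" ".join(buffer))
--         if token in [begin, end]:
--             # Clear buffer if see special token
--             last_special = token
--             buffer = []
--
--     return res
-- ===== SOURCE B (Python) =====
-- def find_valid_sequences(s):
--     tokens = s.split(" ")
--     sp = [(i, t) for i, t in enumerate(tokens) if t in ("BEGIN", "END")]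
--     res = []
--     for (i, ti), (j, tj) in zip(sp, sp[1:]):
--         if ti == "BEGIN" and tj == "END" and j - i > 1:
--             res.append(" ".join(tokens[i + 1:j]))
--     return res
-- ===== Notes on version B (the rewrite author's own statement) =====
-- stated objective: alternative
-- what changed: Replaces A's running last_special/buffer state machine with an index-then-pair pass: build the list of positions of the special tokens once, then emit the joined slice between each adjacent (BEGIN, END) pair of special positions with a nonempty gap.
import Mathlib
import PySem

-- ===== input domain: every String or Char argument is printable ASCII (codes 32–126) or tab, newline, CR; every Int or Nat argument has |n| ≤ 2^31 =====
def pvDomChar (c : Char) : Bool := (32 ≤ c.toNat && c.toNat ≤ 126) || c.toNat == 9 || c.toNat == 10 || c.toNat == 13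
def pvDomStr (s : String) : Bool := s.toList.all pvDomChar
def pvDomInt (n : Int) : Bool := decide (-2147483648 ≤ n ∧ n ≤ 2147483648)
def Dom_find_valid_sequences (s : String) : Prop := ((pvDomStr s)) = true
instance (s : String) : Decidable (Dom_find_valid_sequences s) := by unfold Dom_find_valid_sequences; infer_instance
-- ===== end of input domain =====

-- B replaces A's running last_special/buffer state machine by one pass that indexes the
-- special tokens and emits the slice between each adjacent BEGIN–END pair (objective: alternative).

-- ===== PORT A =====
-- loop body of A's for-loop, as a named step function over the state (last_special, buffer, res)
def fvsStepA (st : String × List String × List String) (token : String) :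
    String × List String × List String :=
  let ls := st.1
  let buffer := st.2.1
  let res := st.2.2
  let pr : List String × List String :=
    if ls = "BEGIN" then
      if token ∉ ["BEGIN", "END"] then (buffer ++ [token], res)
      else if token = "END" ∧ buffer.length > 0 then (buffer, res ++ [PySem.Str.join " " buffer])
      else (buffer, res)
    else (buffer, res)
  if token ∈ ["BEGIN", "END"] then (token, [], pr.2) else (ls, pr.1, pr.2)

def find_valid_sequences (s : String) : List String :=
  let tokens := (PySem.Str.split? s " ").getD []  -- s.split(" "): sep is the nonempty literal " ", so split? is always `some`
  match PySem.List.index? tokens "BEGIN" with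
  | none => []
  | some start =>
    let st := (PySem.List.slice tokens (some (start : Int)) none).foldl fvsStepA ("BEGIN", [], [])
    st.2.2

-- ===== PORT B =====
def find_valid_sequences_alt (s : String) : List String :=
  let tokens := (PySem.Str.split? s " ").getD []  -- s.split(" "): sep is the nonempty literal " ", so split? is always `some`
  let sp := (PySem.List.enumerate tokens 0).filter (fun p => p.2 == "BEGIN" || p.2 == "END")
  (sp.zip sp.tail).foldl
    (fun res pq =>
      if pq.1.2 = "BEGIN" ∧ pq.2.2 = "END" ∧ pq.2.1 - pq.1.1 > 1 then
        res ++ [PySem.Str.join " " (PySem.List.slice tokens (some (pq.1.1 + 1)) (some pq.2.1))]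
      else res)
    []

-- ===== PRECONDITION & SPEC =====
def Spec_find_valid_sequences (s : String) (out : List String) : Prop := out = find_valid_sequences_alt s
instance (s : String) (out : List String) : Decidable (Spec_find_valid_sequences s out) := by unfold Spec_find_valid_sequences; infer_instance

-- ===== CLAIM (what is proved, stated in full; the proofs are below) =====
def Claim_equal_find_valid_sequences : Prop := ∀ (s : String), Dom_find_valid_sequences s → Spec_find_valid_sequences s (find_valid_sequences s)

-- ===== LEMMAS AND PROOFS =====

-- emissions produced by A's loop from state (ls, buf) over the remaining tokens
def fvsRun (ls : String) (buf : List String) : List String → List String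
  | [] => []
  | t :: ts =>
    if t = "BEGIN" ∨ t = "END" then
      (if ls = "BEGIN" ∧ t = "END" ∧ buf.length > 0 then [PySem.Str.join " " buf] else []) ++
        fvsRun t [] ts
    else fvsRun ls (if ls = "BEGIN" then buf ++ [t] else buf) ts

-- split a token list into (run before the first special token, [(special, following run), …])
def fvsCut : List String → List String × List (String × List String)
  | [] => ([], [])
  | t :: ts =>
    let r := fvsCut ts
    if t = "BEGIN" ∨ t = "END" then ([], (t, r.1) :: r.2) else (t :: r.1, r.2)

def fvsFlat (gs : List (String × List String)) : List String :=
  gs.flatMap (fun g => g.1 :: g.2)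

-- subsequences emitted when the previous special token is x with buffered run r
def fvsEmitFrom (x : String) (r : List String) : List (String × List String) → List String
  | [] => []
  | (y, r') :: rest =>
    (if x = "BEGIN" ∧ y = "END" ∧ r ≠ [] then [PySem.Str.join " " r] else []) ++
      fvsEmitFrom y r' rest

def fvsEmitAll : List (String × List String) → List String
  | [] => []
  | (x, r) :: rest => fvsEmitFrom x r rest

-- absolute positions of the special tokens of the groups, first group at index n
def fvsPos (n : Nat) : List (String × List String) → List (Int × String)
  | [] => []
  | (x, r) :: rest => ((n : Int), x) :: fvsPos (n + 1 + r.length) rest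

lemma fvs_emitFrom_irrel (x : String) (hx : x ≠ "BEGIN") (r r' : List String)
    (gs : List (String × List String)) : fvsEmitFrom x r gs = fvsEmitFrom x r' gs := by
  cases gs with
  | nil => rfl
  | cons g rest => obtain ⟨y, r''⟩ := g; simp [fvsEmitFrom, hx]

lemma fvs_emitFrom_notBegin (x : String) (hx : x ≠ "BEGIN") (r : List String)
    (gs : List (String × List String)) : fvsEmitFrom x r gs = fvsEmitAll gs := by
  cases gs with
  | nil => rfl
  | cons g rest => obtain ⟨y, r''⟩ := g; simp [fvsEmitFrom, fvsEmitAll, hx]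

lemma fvs_foldA (l : List String) : ∀ (ls : String) (buf res : List String),
    (l.foldl fvsStepA (ls, buf, res)).2.2 = res ++ fvsRun ls buf l := by
  induction l with
  | nil => intro ls buf res; simp [fvsRun]
  | cons t ts ih =>
    intro ls buf res
    by_cases hs : t = "BEGIN" ∨ t = "END"
    · by_cases hls : ls = "BEGIN"
      · by_cases he : t = "END" ∧ buf.length > 0
        · simp [List.foldl_cons, fvsStepA, fvsRun, hs, hls, he, ih]
        · simp [List.foldl_cons, fvsStepA, fvsRun, hs, hls, he, ih]
      · simp [List.foldl_cons, fvsStepA, fvsRun, hs, hls, ih]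
    · by_cases hls : ls = "BEGIN"
      · simp [List.foldl_cons, fvsStepA, fvsRun, hs, hls, ih]
      · simp [List.foldl_cons, fvsStepA, fvsRun, hs, hls, ih]

lemma fvs_run_eq (l : List String) : ∀ (ls : String) (buf : List String),
    fvsRun ls buf l =
      fvsEmitFrom ls (if ls = "BEGIN" then buf ++ (fvsCut l).1 else buf) (fvsCut l).2 := by
  induction l with
  | nil => intro ls buf; simp [fvsRun, fvsCut, fvsEmitFrom]
  | cons t ts ih =>
    intro ls buf
    by_cases hs : t = "BEGIN" ∨ t = "END"
    · simp only [fvsRun, fvsCut, if_pos hs, fvsEmitFrom]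
      by_cases hls : ls = "BEGIN"
      · simp only [hls]
        congr 1
        · simp [List.length_pos_iff]
        · rw [ih t []]
          by_cases ht : t = "BEGIN"
          · simp [ht]
          · simp only [if_neg ht]
            exact fvs_emitFrom_irrel t ht _ _ _
      · simp only [if_neg hls]
        have h1 : ¬(ls = "BEGIN" ∧ t = "END" ∧ buf.length > 0) := fun h => hls h.1
        simp only [if_neg h1, List.nil_append]
        have h2 : ¬(ls = "BEGIN" ∧ t = "END" ∧ buf ≠ []) := fun h => hls h.1
        simp only [if_neg h2, List.nil_append]
        rw [ih t []]
        by_cases ht : t = "BEGIN"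
        · simp [ht]
        · simp only [if_neg ht]
          exact fvs_emitFrom_irrel t ht _ _ _
    · simp only [fvsRun, fvsCut, if_neg hs]
      rw [ih]
      by_cases hls : ls = "BEGIN" <;> simp [hls]

lemma fvs_cut_glue (ts : List String) : (fvsCut ts).1 ++ fvsFlat (fvsCut ts).2 = ts := by
  induction ts with
  | nil => rfl
  | cons t ts ih =>
    by_cases h : t = "BEGIN" ∨ t = "END" <;> simp [fvsCut, h, fvsFlat] at ih ⊢ <;> simpa using ih

lemma fvs_cut_wf (ts : List String) :
    (∀ t ∈ (fvsCut ts).1, ¬(t = "BEGIN" ∨ t = "END")) ∧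
    (∀ g ∈ (fvsCut ts).2,
      (g.1 = "BEGIN" ∨ g.1 = "END") ∧ ∀ t ∈ g.2, ¬(t = "BEGIN" ∨ t = "END")) := by
  induction ts with
  | nil => simp [fvsCut]
  | cons t ts ih =>
    by_cases h : t = "BEGIN" ∨ t = "END"
    · simp only [fvsCut, if_pos h]
      refine ⟨by simp, ?_⟩
      intro g hg
      rcases List.mem_cons.mp hg with hg | hg
      · subst hg; exact ⟨h, ih.1⟩
      · exact ih.2 g hg
    · simp only [fvsCut, if_neg h]
      refine ⟨?_, ih.2⟩
      intro t' ht'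
      rcases List.mem_cons.mp ht' with ht' | ht'
      · subst ht'; exact h
      · exact ih.1 t' ht'

lemma fvs_filter_nospec (p : List String) : ∀ (n : Int),
    (∀ t ∈ p, ¬(t = "BEGIN" ∨ t = "END")) →
    (PySem.List.enumerate p n).filter (fun q => q.2 == "BEGIN" || q.2 == "END") = [] := by
  induction p with
  | nil => intro n _; simp [PySem.List.enumerate_nil]
  | cons t ts ih =>
    intro n h
    simp only [PySem.List.enumerate_cons, List.filter_cons]
    have h1 := h t (by simp)
    have h2 : ((t == "BEGIN" || t == "END") = false) := by
      simp only [Bool.or_eq_false_iff, beq_eq_false_iff_ne]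
      exact ⟨fun e => h1 (Or.inl e), fun e => h1 (Or.inr e)⟩
    simp only [h2]
    exact ih (n + 1) (fun t' ht' => h t' (by simp [ht']))

lemma fvs_filter_enum (gs : List (String × List String)) : ∀ (p : List String) (n : Nat),
    (∀ t ∈ p, ¬(t = "BEGIN" ∨ t = "END")) →
    (∀ g ∈ gs, (g.1 = "BEGIN" ∨ g.1 = "END") ∧ ∀ t ∈ g.2, ¬(t = "BEGIN" ∨ t = "END")) →
    (PySem.List.enumerate (p ++ fvsFlat gs) (n : Int)).filter
        (fun q => q.2 == "BEGIN" || q.2 == "END") =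
      fvsPos (n + p.length) gs := by
  induction gs with
  | nil =>
    intro p n hp _
    simp only [fvsFlat, List.flatMap_nil, List.append_nil, fvsPos]
    exact fvs_filter_nospec p n hp
  | cons g rest ih =>
    intro p n hp hg
    obtain ⟨x, r⟩ := g
    have hflat : fvsFlat ((x, r) :: rest) = x :: (r ++ fvsFlat rest) := by simp [fvsFlat]
    rw [hflat, PySem.List.enumerate_append, List.filter_append, fvs_filter_nospec p n hp,
      PySem.List.enumerate_cons, List.filter_cons]
    have hx : (x == "BEGIN" || x == "END") = true := by
      have hh : x = "BEGIN" ∨ x = "END" := (hg (x, r) (by simp)).1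
      rcases hh with h | h <;> simp [h]
    simp only [List.nil_append, hx]
    have hcast : ((n : Int) + (p.length : Int) + 1) = ((n + p.length + 1 : Nat) : Int) := by
      push_cast; ring
    rw [hcast, ih r (n + p.length + 1) (hg (x, r) (by simp)).2
      (fun g hgm => hg g (by simp [hgm]))]
    simp only [fvsPos]
    have h1 : ((n : Int) + (p.length : Int)) = ((n + p.length : Nat) : Int) := by push_cast; ring
    rw [h1]
    norm_num

lemma fvs_pairs (gs : List (String × List String)) :
    ∀ (x : String) (r : List String) (n : Nat) (tokens : List String),
    tokens.drop (n + 1) = r ++ fvsFlat gs →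
    (((fvsPos n ((x, r) :: gs)).zip (fvsPos n ((x, r) :: gs)).tail).filter
        (fun pq => decide (pq.1.2 = "BEGIN" ∧ pq.2.2 = "END" ∧ pq.2.1 - pq.1.1 > 1))).map
        (fun pq => PySem.Str.join " " (PySem.List.slice tokens (some (pq.1.1 + 1)) (some pq.2.1)))
      = fvsEmitFrom x r gs := by
  induction gs with
  | nil => intro x r n tokens _; simp [fvsPos, fvsEmitFrom]
  | cons g rest ih =>
    intro x r n tokens hdrop
    obtain ⟨y, r'⟩ := g
    have hflat : fvsFlat ((y, r') :: rest) = y :: (r' ++ fvsFlat rest) := by simp [fvsFlat]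
    rw [hflat] at hdrop
    have hm : fvsPos n ((x, r) :: (y, r') :: rest) =
        ((n : Int), x) :: fvsPos (n + 1 + r.length) ((y, r') :: rest) := rfl
    have hm2 : fvsPos (n + 1 + r.length) ((y, r') :: rest) =
        (((n + 1 + r.length : Nat) : Int), y) ::
          fvsPos (n + 1 + r.length + 1 + r'.length) rest := rfl
    have hzip : ((fvsPos n ((x, r) :: (y, r') :: rest)).zip
          (fvsPos n ((x, r) :: (y, r') :: rest)).tail) =
        (((n : Int), x), (((n + 1 + r.length : Nat) : Int), y)) ::
          ((fvsPos (n + 1 + r.length) ((y, r') :: rest)).zip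
            (fvsPos (n + 1 + r.length) ((y, r') :: rest)).tail) := by
      rw [hm, hm2]; rfl
    rw [hzip]
    have hdrop' : tokens.drop (n + 1 + r.length + 1) = r' ++ fvsFlat rest := by
      have h1 : tokens.drop (n + 1 + r.length) = y :: (r' ++ fvsFlat rest) := by
        have h0 : tokens.drop (n + 1 + r.length) = (tokens.drop (n + 1)).drop r.length := by
          rw [List.drop_drop]
        rw [h0, hdrop]
        rw [List.drop_left]
      have h2 : tokens.drop (n + 1 + r.length + 1) = (tokens.drop (n + 1 + r.length)).drop 1 := by
        rw [List.drop_drop]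
      rw [h2, h1]; rfl
    have hrec := ih y r' (n + 1 + r.length) tokens hdrop'
    have hcond : (x = "BEGIN" ∧ y = "END" ∧ (((n + 1 + r.length : Nat) : Int)) - (n : Int) > 1)
        ↔ (x = "BEGIN" ∧ y = "END" ∧ r ≠ []) := by
      constructor
      · rintro ⟨h1, h2, h3⟩
        refine ⟨h1, h2, ?_⟩
        intro he; subst he; simp only [List.length_nil] at h3; omega
      · rintro ⟨h1, h2, h3⟩
        refine ⟨h1, h2, ?_⟩
        have : 0 < r.length := List.length_pos_iff.mpr h3
        push_cast; omega
    by_cases hc : x = "BEGIN" ∧ y = "END" ∧ r ≠ []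
    · rw [List.filter_cons_of_pos (by simp only [decide_eq_true_eq]; exact hcond.mpr hc)]
      rw [List.map_cons, hrec]
      have hslice : PySem.List.slice tokens (some ((n : Int) + 1))
          (some ((n + 1 + r.length : Nat) : Int)) = r := by
        have h1 : ((n : Int) + 1) = ((n + 1 : Nat) : Int) := by push_cast; ring
        rw [h1, PySem.List.slice_natCast]
        have h2 : n + 1 + r.length - (n + 1) = r.length := by omega
        rw [h2, hdrop]
        exact List.take_left
      rw [hslice]
      simp only [fvsEmitFrom, if_pos hc]
      rfl
    · rw [List.filter_cons_of_neg
        (by simp only [decide_eq_true_eq]; exact fun h => hc (hcond.mp h))]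
      rw [hrec]
      simp only [fvsEmitFrom, if_neg hc, List.nil_append]

lemma fvs_B_eq (tokens : List String) :
    (((PySem.List.enumerate tokens 0).filter (fun p => p.2 == "BEGIN" || p.2 == "END")).zip
        ((PySem.List.enumerate tokens 0).filter (fun p => p.2 == "BEGIN" || p.2 == "END")).tail).foldl
        (fun res pq =>
          if pq.1.2 = "BEGIN" ∧ pq.2.2 = "END" ∧ pq.2.1 - pq.1.1 > 1 then
            res ++ [PySem.Str.join " " (PySem.List.slice tokens (some (pq.1.1 + 1)) (some pq.2.1))]
          else res)
        [] = fvsEmitAll (fvsCut tokens).2 := by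
  rw [PySem.List.foldl_append_ite
    (fun pq : (Int × String) × (Int × String) =>
      pq.1.2 = "BEGIN" ∧ pq.2.2 = "END" ∧ pq.2.1 - pq.1.1 > 1)
    (fun pq => PySem.Str.join " " (PySem.List.slice tokens (some (pq.1.1 + 1)) (some pq.2.1)))]
  simp only [List.nil_append]
  have hwf := fvs_cut_wf tokens
  have hsp : (PySem.List.enumerate tokens 0).filter (fun p => p.2 == "BEGIN" || p.2 == "END") =
      fvsPos ((fvsCut tokens).1.length) (fvsCut tokens).2 := by
    conv_lhs => rw [← fvs_cut_glue tokens]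
    rw [show (0 : Int) = ((0 : Nat) : Int) from rfl]
    rw [fvs_filter_enum (fvsCut tokens).2 (fvsCut tokens).1 0 hwf.1 hwf.2]
    norm_num
  rw [hsp]
  cases h2 : (fvsCut tokens).2 with
  | nil => simp [fvsPos, fvsEmitAll]
  | cons g gs =>
    obtain ⟨x, r⟩ := g
    have hdrop : tokens.drop ((fvsCut tokens).1.length + 1) = r ++ fvsFlat gs := by
      have hglue := fvs_cut_glue tokens
      rw [h2] at hglue
      have hflat : fvsFlat ((x, r) :: gs) = x :: (r ++ fvsFlat gs) := by simp [fvsFlat]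
      rw [hflat] at hglue
      have h0 : tokens.drop ((fvsCut tokens).1.length + 1) =
          (tokens.drop ((fvsCut tokens).1.length)).drop 1 := by rw [List.drop_drop]
      have h1 : tokens.drop ((fvsCut tokens).1.length) = x :: (r ++ fvsFlat gs) := by
        have hc := congrArg (List.drop ((fvsCut tokens).1.length)) hglue
        rw [List.drop_left] at hc
        exact hc.symm
      rw [h0, h1]
      rfl
    rw [fvs_pairs gs x r ((fvsCut tokens).1.length) tokens hdrop]
    rw [fvsEmitAll]

lemma fvs_noBegin (ts : List String) (h : "BEGIN" ∉ ts) : fvsEmitAll (fvsCut ts).2 = [] := by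
  induction ts with
  | nil => rfl
  | cons t ts ih =>
    simp at h
    by_cases hs : t = "BEGIN" ∨ t = "END"
    · have ht : t = "END" := by
        rcases hs with h1 | h1
        · exact absurd h1.symm h.1
        · exact h1
      simp only [fvsCut, if_pos hs, fvsEmitAll]
      rw [ht, fvs_emitFrom_notBegin "END" (by decide) _ _]
      exact ih h.2
    · simp only [fvsCut, if_neg hs]
      exact ih h.2

lemma fvs_skipPre (pre : List String) : ∀ (suf : List String), "BEGIN" ∉ pre →
    fvsEmitAll (fvsCut (pre ++ "BEGIN" :: suf)).2 =
      fvsEmitFrom "BEGIN" (fvsCut suf).1 (fvsCut suf).2 := by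
  induction pre with
  | nil => intro suf _; simp [fvsCut, fvsEmitAll]
  | cons t pre ih =>
    intro suf h
    simp at h
    by_cases hs : t = "BEGIN" ∨ t = "END"
    · have ht : t = "END" := by
        rcases hs with h1 | h1
        · exact absurd h1.symm h.1
        · exact h1
      simp only [List.cons_append, fvsCut, if_pos hs, fvsEmitAll]
      rw [ht, fvs_emitFrom_notBegin "END" (by decide) _ _]
      exact ih suf h.2
    · simp only [List.cons_append, fvsCut, if_neg hs]
      exact ih suf h.2

lemma fvs_A_eq (tokens : List String) :
    (match PySem.List.index? tokens "BEGIN" with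
     | none => ([] : List String)
     | some start =>
       ((PySem.List.slice tokens (some (start : Int)) none).foldl fvsStepA ("BEGIN", [], [])).2.2)
      = fvsEmitAll (fvsCut tokens).2 := by
  cases hidx : PySem.List.index? tokens "BEGIN" with
  | none =>
    have hnb : "BEGIN" ∉ tokens := (PySem.List.index?_eq_none_iff tokens "BEGIN").mp hidx
    rw [fvs_noBegin tokens hnb]
  | some start =>
    obtain ⟨pre, suf, htok, hlen, hpre⟩ := (PySem.List.index?_eq_some_iff tokens "BEGIN" start).mp hidx
    simp only
    rw [PySem.List.slice_from_natCast]
    have hdrop : tokens.drop start = "BEGIN" :: suf := by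
      rw [htok, ← hlen, List.drop_left]
    rw [hdrop, fvs_foldA, List.nil_append]
    have hrun : fvsRun "BEGIN" [] ("BEGIN" :: suf) = fvsRun "BEGIN" [] suf := by
      simp [fvsRun]
    rw [hrun, fvs_run_eq]
    simp only [if_true, List.nil_append]
    rw [htok, fvs_skipPre pre suf hpre]

-- ===== VERDICT (by name: the statement is the Claim_ definition above) =====
theorem find_valid_sequences_spec : Claim_equal_find_valid_sequences := by
  intro s _
  unfold Spec_find_valid_sequences find_valid_sequences find_valid_sequences_alt
  rw [fvs_A_eq, fvs_B_eq]
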